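-- pv_equiv track=rewrite | github.com/antimatter-ai-org/guardrails | app/core/analysis/span_normalizer.py | _split_comma_segments
-- ===== SOURCE A (Python) =====
-- def _split_comma_segments(text: str, start: int, end: int) -> list[tuple[int, int]]:
--     if end <= start:
--         return []
--     segments: list[tuple[int, int]] = []
--     seg_start = start
--     idx = start
--     while idx < end:
--         if text[idx] == ",":
--             segments.append((seg_start, idx))
--             seg_start = idx + 1
--         idx += 1
--     segments.append((seg_start, end))
--     return segments
-- ===== SOURCE B (Python) =====
-- def _split_comma_segments(text: str, start: int, end: int) -> list[tuple[int, int]]: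
--     if end <= start:
--         return []
--     out: list[tuple[int, int]] = []
--     offset = start
--     for part in text[start:end].split(','):
--         out.append((offset, offset + len(part)))
--         offset += len(part) + 1
--     return out
-- ===== Notes on version B (the rewrite author's own statement) =====
-- stated objective: idiomatic
-- what changed: Replaces A's index-by-index character scan with a library str.split(',') on the slice plus a running-offset walk that rebuilds the index pairs from segment lengths.
-- outside the precondition, e.g. on _split_comma_segments('abc', -2, 1): A returns [(-2, 1)], B returns [(-2, -2)]; on _split_comma_segments('ab', 0, 5): A raises IndexError, B returns [(0, 2)]
import Mathlib
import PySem

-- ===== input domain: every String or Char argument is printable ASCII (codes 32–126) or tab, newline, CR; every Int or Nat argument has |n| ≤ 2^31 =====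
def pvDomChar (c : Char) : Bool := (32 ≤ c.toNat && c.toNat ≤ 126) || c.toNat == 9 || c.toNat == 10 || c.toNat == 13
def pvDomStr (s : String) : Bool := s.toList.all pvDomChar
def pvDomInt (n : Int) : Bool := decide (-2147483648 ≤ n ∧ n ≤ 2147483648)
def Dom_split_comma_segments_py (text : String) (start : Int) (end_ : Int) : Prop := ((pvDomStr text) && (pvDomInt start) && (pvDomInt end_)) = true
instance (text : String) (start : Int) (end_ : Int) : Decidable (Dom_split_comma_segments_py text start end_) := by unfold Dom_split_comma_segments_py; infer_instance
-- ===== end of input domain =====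

-- B replaces A's index-by-index character scan with a library split(',') on the slice
-- plus a running-offset walk rebuilding the pairs from segment lengths (idiomatic, same cost).

-- ===== PORT A =====
-- the while loop: fuel = number of remaining iterations (end - idx); returns (seg_start, segments)
def scsALoop (cs : List Char) (end_ : Int) : Nat → Int → Int → List (Int × Int) → Int × List (Int × Int)
  | 0, _, seg_start, segs => (seg_start, segs)
  | fuel + 1, idx, seg_start, segs =>
    if idx < end_ then
      match PySem.List.pyGet? cs idx with
      | none => (seg_start, segs)   -- IndexError in Python; outside Pre_
      | some c =>
        if c = ',' then scsALoop cs end_ fuel (idx + 1) (idx + 1) (segs ++ [(seg_start, idx)])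
        else scsALoop cs end_ fuel (idx + 1) seg_start segs
    else (seg_start, segs)

def split_comma_segments_py (text : String) (start : Int) (end_ : Int) : List (Int × Int) :=
  if end_ ≤ start then []
  else
    let r := scsALoop text.toList end_ (end_ - start).toNat start start []
    r.2 ++ [(r.1, end_)]

-- ===== PORT B =====
-- the for loop over parts with the running offset
def scsBGo : Int → List (List Char) → List (Int × Int)
  | _, [] => []
  | offset, p :: ps => (offset, offset + (p.length : Int)) :: scsBGo (offset + (p.length : Int) + 1) ps

def split_comma_segments_py_alt (text : String) (start : Int) (end_ : Int) : List (Int × Int) :=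
  if end_ ≤ start then []
  else scsBGo start (PySem.Chars.splitOn (PySem.List.slice text.toList (some start) (some end_)) [','])

-- ===== PRECONDITION & SPEC =====
-- Pre_ excludes inputs where A raises IndexError (start < end with end > len(text) or an index
-- below -len), and the negative-start inputs where A happens to return via Python's
-- negative-index wraparound — an unspecified corner of this internal helper that the slice-based
-- B renders differently; on the natural domain 0 ≤ start (or the empty range) both agree.
def Pre_split_comma_segments_py (text : String) (start : Int) (end_ : Int) : Prop :=
  end_ ≤ start ∨ (0 ≤ start ∧ end_ ≤ (text.toList.length : Int))
instance (text : String) (start : Int) (end_ : Int) : Decidable (Pre_split_comma_segments_py text start end_) := by unfold Pre_split_comma_segments_py; infer_instance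

def pvWitness_split_comma_segments_py : String × Int × Int := ("a,b,,c", 0, 6)

def Spec_split_comma_segments_py (text : String) (start : Int) (end_ : Int) (out : List (Int × Int)) : Prop := out = split_comma_segments_py_alt text start end_
instance (text : String) (start : Int) (end_ : Int) (out : List (Int × Int)) : Decidable (Spec_split_comma_segments_py text start end_ out) := by unfold Spec_split_comma_segments_py; infer_instance

-- ===== CLAIM (what is proved, stated in full; the proofs are below) =====
def Claim_equal_split_comma_segments_py : Prop := ∀ (text : String) (start : Int) (end_ : Int), Dom_split_comma_segments_py text start end_ → Pre_split_comma_segments_py text start end_ → Spec_split_comma_segments_py text start end_ (split_comma_segments_py text start end_)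

-- ===== LEMMAS AND PROOFS =====

-- pure structural version of splitOn on a single comma separator
def spComma : List Char → List (List Char)
  | [] => [[]]
  | c :: l => if c = ',' then [] :: spComma l
              else match spComma l with
                   | [] => [[c]]
                   | p :: ps => (c :: p) :: ps

theorem spComma_ne_nil (l : List Char) : spComma l ≠ [] := by
  cases l with
  | nil => simp [spComma]
  | cons c t =>
    simp only [spComma]
    split
    · simp
    · cases h : spComma t <;> simp

theorem go_comma_spec (fuel : Nat) : ∀ (l cur : List Char) (acc : List (List Char)),
    l.length ≤ fuel →
    PySem.Chars.splitOn.go [','] fuel l cur acc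
      = acc.reverse ++ (spComma l).modifyHead (cur.reverse ++ ·) := by
  induction fuel with
  | zero =>
    intro l cur acc h
    have : l = [] := List.length_eq_zero_iff.mp (Nat.le_zero.mp h)
    subst this
    simp [PySem.Chars.splitOn.go, spComma]
  | succ fuel ih =>
    intro l cur acc h
    cases l with
    | nil => simp [PySem.Chars.splitOn.go, spComma]
    | cons c rest =>
      by_cases hc : c = ','
      · subst hc
        have hpre : List.isPrefixOf [','] (',' :: rest) = true := by
          simp [List.isPrefixOf]
        simp only [PySem.Chars.splitOn.go, hpre, if_true, List.length_singleton,
          List.drop_succ_cons, List.drop_zero]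
        rw [ih rest [] (cur.reverse :: acc) (by simpa using Nat.le_of_succ_le_succ h)]
        simp only [spComma, List.reverse_cons, List.reverse_nil, List.nil_append,
          List.append_assoc, List.singleton_append]
        cases spComma rest <;> simp
      · have hpre : List.isPrefixOf [','] (c :: rest) = false := by
          simp [List.isPrefixOf]
          exact fun hcc => absurd hcc.symm hc
        simp only [PySem.Chars.splitOn.go, hpre, Bool.false_eq_true, if_false]
        rw [ih rest (c :: cur) acc (by simpa using Nat.le_of_succ_le_succ h)]
        obtain ⟨p, ps, hsp⟩ : ∃ p ps, spComma rest = p :: ps := by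
          cases hh : spComma rest with
          | nil => exact absurd hh (spComma_ne_nil rest)
          | cons p ps => exact ⟨p, ps, rfl⟩
        simp [spComma, hc, hsp]

theorem splitOn_comma (l : List Char) : PySem.Chars.splitOn l [','] = spComma l := by
  unfold PySem.Chars.splitOn
  rw [go_comma_spec (l.length + 1) l [] [] (by omega)]
  simp only [List.reverse_nil, List.nil_append]
  cases spComma l <;> simp

-- pure version of A's scan over the char list actually visited
def scanA : List Char → Int → Int → List (Int × Int) → Int × List (Int × Int)
  | [], _, seg_start, segs => (seg_start, segs)
  | c :: l, idx, seg_start, segs =>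
    if c = ',' then scanA l (idx + 1) (idx + 1) (segs ++ [(seg_start, idx)])
    else scanA l (idx + 1) seg_start segs

theorem scsALoop_eq_scanA (cs : List Char) (end_ : Int) :
    ∀ (fuel : Nat) (idx seg_start : Int) (segs : List (Int × Int)),
    0 ≤ idx → idx + (fuel : Int) = end_ → end_ ≤ (cs.length : Int) →
    scsALoop cs end_ fuel idx seg_start segs
      = scanA ((cs.drop idx.toNat).take fuel) idx seg_start segs := by
  intro fuel
  induction fuel with
  | zero => intro idx ss segs _ _ _; simp [scsALoop, scanA]
  | succ fuel ih =>
    intro idx ss segs h0 hsum hlen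
    have hlt : idx < end_ := by omega
    have hlt' : idx.toNat < cs.length := by omega
    have hget : PySem.List.pyGet? cs idx = some cs[idx.toNat] :=
      PySem.List.pyGet?_eq_some_getElem cs h0 (by exact_mod_cast lt_of_lt_of_le hlt hlen)
    have hdrop : cs.drop idx.toNat = cs[idx.toNat] :: cs.drop (idx.toNat + 1) :=
      List.drop_eq_getElem_cons hlt'
    have htn : (idx + 1).toNat = idx.toNat + 1 := by omega
    simp only [scsALoop, if_pos hlt, hget, hdrop, List.take_succ_cons, scanA]
    by_cases hc : cs[idx.toNat] = ','
    · simp only [if_pos hc]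
      rw [ih (idx + 1) (idx + 1) (segs ++ [(ss, idx)]) (by omega) (by omega) hlen, htn]
    · simp only [if_neg hc]
      rw [ih (idx + 1) ss segs (by omega) (by omega) hlen, htn]

-- B's walk where the first pair's left end is the (possibly different) seg_start
def mixB (seg_start idx : Int) : List (List Char) → List (Int × Int)
  | [] => []
  | p :: ps => (seg_start, idx + (p.length : Int)) :: scsBGo (idx + (p.length : Int) + 1) ps

theorem mixB_self (b : Int) (ps : List (List Char)) : mixB b b ps = scsBGo b ps := by
  cases ps <;> simp [mixB, scsBGo]

theorem scanA_eq_mixB (l : List Char) :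
    ∀ (idx seg_start : Int) (segs : List (Int × Int)),
    (scanA l idx seg_start segs).2 ++ [((scanA l idx seg_start segs).1, idx + (l.length : Int))]
      = segs ++ mixB seg_start idx (spComma l) := by
  induction l with
  | nil => intro idx ss segs; simp [scanA, spComma, mixB, scsBGo]
  | cons c l ih =>
    intro idx ss segs
    have hlc : (((c :: l).length) : Int) = (l.length : Int) + 1 := by
      push_cast [List.length_cons]; ring
    by_cases hc : c = ','
    · subst hc
      simp only [scanA, spComma, reduceIte]
      rw [hlc, show idx + ((l.length : Int) + 1) = (idx + 1) + (l.length : Int) by ring]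
      rw [ih (idx + 1) (idx + 1) (segs ++ [(ss, idx)]), mixB_self]
      simp [mixB]
    · obtain ⟨p, ps, hsp⟩ : ∃ p ps, spComma l = p :: ps := by
        cases hh : spComma l with
        | nil => exact absurd hh (spComma_ne_nil l)
        | cons p ps => exact ⟨p, ps, rfl⟩
      simp only [scanA, if_neg hc, spComma, hsp]
      rw [hlc, show idx + ((l.length : Int) + 1) = (idx + 1) + (l.length : Int) by ring]
      rw [ih (idx + 1) ss segs, hsp]
      simp only [mixB]
      have hpc : (((c :: p).length) : Int) = (p.length : Int) + 1 := by
        push_cast [List.length_cons]; ring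
      rw [hpc, show idx + ((p.length : Int) + 1) = (idx + 1) + (p.length : Int) by ring]

-- ===== VERDICT (by name: the statement is the Claim_ definition above) =====
theorem split_comma_segments_py_spec : Claim_equal_split_comma_segments_py := by
  intro text start end_ _ hpre
  unfold Spec_split_comma_segments_py
  unfold split_comma_segments_py split_comma_segments_py_alt
  by_cases h : end_ ≤ start
  · simp [h]
  · simp only [h, if_false]
    rcases hpre with hpre | ⟨h0, hlen⟩
    · exact absurd hpre h
    have hlt : start < end_ := lt_of_not_ge h
    set cs := text.toList with hcs
    have hslice : PySem.List.slice cs (some start) (some end_)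
        = (cs.drop start.toNat).take (end_.toNat - start.toNat) :=
      PySem.List.slice_toNat cs h0 (by omega)
    have hfuel : (end_ - start).toNat = end_.toNat - start.toNat := by omega
    rw [scsALoop_eq_scanA cs end_ (end_ - start).toNat start start [] h0 (by omega) hlen]
    set l := (cs.drop start.toNat).take (end_ - start).toNat with hl
    have hlen2 : l.length = (end_ - start).toNat := by
      rw [hl, List.length_take, List.length_drop]
      omega
    have hllen : (l.length : Int) = end_ - start := by
      rw [hlen2]; omega
    have hthis := scanA_eq_mixB l start start []
    rw [mixB_self] at hthis
    simp only [List.nil_append] at hthis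
    rw [hslice, splitOn_comma, ← hfuel, ← hl]
    rw [show end_ = start + (l.length : Int) by omega]
    exact hthis
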